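-- pv_equiv track=rewrite | github.com/Natkuma01/CodePath_TIP103 | Unit3/Session1/Version1.py | arrange_guest_arrival_order
-- ===== SOURCE A (Python) =====
-- def arrange_guest_arrival_order(arrival_pattern):
--     stack = []
--     res = []
--
--     for i in range(len(arrival_pattern) + 1):
--         stack.append(i + 1)
--
--         if i == len(arrival_pattern) or arrival_pattern[i] == 'I':
--             while stack:
--                 res.append(stack.pop())
--     return ''.join(map(str, res))
-- ===== SOURCE B (Python) =====
-- def arrange_guest_arrival_order(arrival_pattern):
--     out = []
--     start = 1
--     for run in arrival_pattern.split('I'):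
--         end = start + len(run)
--         out.extend(range(end, start - 1, -1))
--         start = end + 1
--     return ''.join(map(str, out))
-- ===== Notes on version B (the rewrite author's own statement) =====
-- stated objective: simpler
-- what changed: Replaces the per-character stack simulation (push each number, pop-flush at every 'I' or at the end) by splitting the pattern on 'I' and emitting one descending arithmetic range per run, tracked with a single start counter.
import Mathlib
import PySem

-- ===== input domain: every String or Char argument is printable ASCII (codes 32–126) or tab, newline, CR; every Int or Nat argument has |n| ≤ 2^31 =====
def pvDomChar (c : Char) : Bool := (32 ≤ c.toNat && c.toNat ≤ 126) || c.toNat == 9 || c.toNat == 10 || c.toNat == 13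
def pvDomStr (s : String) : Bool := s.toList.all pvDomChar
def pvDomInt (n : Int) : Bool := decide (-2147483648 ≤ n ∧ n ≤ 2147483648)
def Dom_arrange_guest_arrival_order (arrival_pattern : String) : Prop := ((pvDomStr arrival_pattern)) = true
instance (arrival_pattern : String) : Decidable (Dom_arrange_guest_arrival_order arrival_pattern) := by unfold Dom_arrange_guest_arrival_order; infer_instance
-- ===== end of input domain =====

-- B replaces A's per-character stack simulation by split-on-'I' plus one descending range per run
-- (objective: simpler); proved to return the same string on every input.


-- ===== PORT A =====
-- 'while stack: res.append(stack.pop())' — pop from the end, append to res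
def pvFlushA (stack res : List Int) : List Int × List Int :=
  if h : stack = [] then (stack, res)
  else pvFlushA stack.dropLast (res ++ [stack.getLast h])
termination_by stack.length
decreasing_by
  have := List.length_pos_of_ne_nil h
  simp [List.length_dropLast]
  omega

-- one iteration of A's for-loop body (the 'or' is non-short-circuit here, but when
-- i = len the left disjunct already decides it, so the pyGetD default is never the value used)
def pvStepA (cs : List Char) (acc : List Int × List Int) (i : Int) : List Int × List Int :=
  let stack := acc.1 ++ [i + 1]
  if i = (cs.length : Int) ∨ PySem.List.pyGetD cs i 'D' = 'I' then pvFlushA stack acc.2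
  else (stack, acc.2)

def arrange_guest_arrival_order (arrival_pattern : String) : String :=
  let cs := arrival_pattern.toList
  let res := ((PySem.List.pyRange 0 ((cs.length : Int) + 1) 1).foldl (pvStepA cs) ([], [])).2
  PySem.Str.join "" (res.map PySem.Int.toStr)

-- ===== PORT B =====
-- the for-loop of B over the runs, carrying (out, start)
def pvBLoop (runs : List (List Char)) (out : List Int) (start : Int) : List Int :=
  match runs with
  | [] => out
  | r :: rs =>
      let e : Int := start + (r.length : Int)
      pvBLoop rs (out ++ PySem.List.pyRange e (start - 1) (-1)) (e + 1)

def arrange_guest_arrival_order_alt (arrival_pattern : String) : String :=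
  let runs := PySem.Chars.splitOn arrival_pattern.toList ['I']   -- arrival_pattern.split('I')
  PySem.Str.join "" ((pvBLoop runs [] 1).map PySem.Int.toStr)

-- ===== PRECONDITION & SPEC =====
def Spec_arrange_guest_arrival_order (arrival_pattern : String) (out : String) : Prop := out = arrange_guest_arrival_order_alt arrival_pattern
instance (arrival_pattern : String) (out : String) : Decidable (Spec_arrange_guest_arrival_order arrival_pattern out) := by unfold Spec_arrange_guest_arrival_order; infer_instance

-- ===== CLAIM (what is proved, stated in full; the proofs are below) =====
def Claim_equal_arrange_guest_arrival_order : Prop := ∀ (arrival_pattern : String), Dom_arrange_guest_arrival_order arrival_pattern → Spec_arrange_guest_arrival_order arrival_pattern (arrange_guest_arrival_order arrival_pattern)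

-- ===== LEMMAS AND PROOFS =====

-- first run (up to the first 'I') and the remaining runs of a character list
def pvSplitIp : List Char → (List Char × List (List Char))
  | [] => ([], [])
  | c :: t =>
      let p := pvSplitIp t
      if c = 'I' then ([], p.1 :: p.2) else (c :: p.1, p.2)

-- recursion-over-the-chars form of A's loop (i the current index, acc = (stack, res))
def pvAGo : List Char → Int → (List Int × List Int) → (List Int × List Int)
  | [], k, acc => pvFlushA (acc.1 ++ [k + 1]) acc.2
  | c :: rest, k, acc =>
      if c = 'I' then pvAGo rest (k + 1) (pvFlushA (acc.1 ++ [k + 1]) acc.2)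
      else pvAGo rest (k + 1) (acc.1 ++ [k + 1], acc.2)

theorem pvFlushA_eq (stack res : List Int) : pvFlushA stack res = ([], res ++ stack.reverse) := by
  induction stack using List.reverseRecOn generalizing res with
  | nil => rw [pvFlushA.eq_def]; simp
  | append_singleton xs x ih =>
      rw [pvFlushA.eq_def]
      simp [ih]

theorem pvBLoop_append (rs : List (List Char)) (out : List Int) (start : Int) :
    pvBLoop rs out start = out ++ pvBLoop rs [] start := by
  induction rs generalizing out start with
  | nil => simp [pvBLoop]
  | cons r rs ih =>
      rw [pvBLoop, pvBLoop]
      rw [ih, ih (out := [] ++ _)]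
      simp

theorem pvSplitOn_go_eq (fuel : Nat) :
    ∀ (l cur : List Char) (acc : List (List Char)), l.length < fuel →
      PySem.Chars.splitOn.go ['I'] fuel l cur acc
        = acc.reverse ++ (cur.reverse ++ (pvSplitIp l).1) :: (pvSplitIp l).2 := by
  induction fuel with
  | zero => intro l cur acc h; omega
  | succ f ih =>
      intro l cur acc h
      cases l with
      | nil => simp [PySem.Chars.splitOn.go, pvSplitIp]
      | cons c rest =>
          by_cases hc : c = 'I'
          · subst hc
            rw [PySem.Chars.splitOn.go]
            simp only [List.isPrefixOf, BEq.rfl, Bool.true_and,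
              if_pos, List.length_cons, List.drop_succ_cons]
            simp only [List.length_nil, List.drop_zero]
            rw [ih rest [] (cur.reverse :: acc) (by simpa using Nat.lt_of_succ_lt_succ h)]
            simp [pvSplitIp]
          · rw [PySem.Chars.splitOn.go]
            have hpre : (['I'].isPrefixOf (c :: rest)) = false := by
              simp [List.isPrefixOf]
              exact fun hh => absurd hh.symm hc
            rw [if_neg (by simp [hpre])]
            rw [ih rest (c :: cur) acc (by simpa using Nat.lt_of_succ_lt_succ h)]
            simp [pvSplitIp, hc]

theorem pvSplitOn_eq (cs : List Char) :
    PySem.Chars.splitOn cs ['I'] = (pvSplitIp cs).1 :: (pvSplitIp cs).2 := by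
  unfold PySem.Chars.splitOn
  rw [pvSplitOn_go_eq (cs.length + 1) cs [] [] (by omega)]
  simp

theorem pvBridgeA (cs : List Char) :
    ∀ (ds : List Char) (j : Nat) (acc : List Int × List Int),
      cs.drop j = ds → j ≤ cs.length →
      (PySem.List.pyRange (j : Int) ((cs.length : Int) + 1) 1).foldl (pvStepA cs) acc
        = pvAGo ds (j : Int) acc := by
  intro ds
  induction ds with
  | nil =>
      intro j acc hd hj
      have hjl : j = cs.length := by
        have := List.drop_eq_nil_iff.mp hd
        omega
      subst hjl
      rw [PySem.List.pyRange_one_cons (by omega), PySem.List.pyRange_one_eq_nil (by omega)]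
      simp only [List.foldl_cons, List.foldl_nil]
      rw [pvAGo, pvStepA]
      simp
  | cons c rest ih =>
      intro j acc hd hj
      have hjlt : j < cs.length := by
        by_contra hge
        rw [List.drop_eq_nil_iff.mpr (by omega)] at hd
        exact List.cons_ne_nil _ _ hd.symm
      have hget : cs[j] = c := by
        have h2 := List.getElem_cons_drop hjlt
        rw [hd] at h2
        exact (List.cons_eq_cons.mp h2.symm).1.symm
      have hdrop : cs.drop (j + 1) = rest := by
        have h2 := List.getElem_cons_drop hjlt
        rw [hd] at h2
        exact (List.cons_eq_cons.mp h2.symm).2.symm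
      rw [PySem.List.pyRange_one_cons (by omega)]
      simp only [List.foldl_cons]
      have hstep : pvStepA cs acc (j : Int)
          = if c = 'I' then pvFlushA (acc.1 ++ [(j : Int) + 1]) acc.2
            else (acc.1 ++ [(j : Int) + 1], acc.2) := by
        rw [pvStepA]
        have hne : ¬ ((j : Int) = (cs.length : Int)) := by omega
        have hgd : PySem.List.pyGetD cs (j : Int) 'D' = c := by
          rw [PySem.List.pyGetD_natCast, List.getD_eq_getElem cs 'D' hjlt]
          exact hget
        simp only [hgd, hne, false_or]
      rw [hstep, pvAGo]
      by_cases hc : c = 'I'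
      · rw [if_pos hc, if_pos hc]
        have := ih (j + 1) (pvFlushA (acc.1 ++ [(j : Int) + 1]) acc.2) hdrop (by omega)
        push_cast at this ⊢
        exact this
      · rw [if_neg hc, if_neg hc]
        have := ih (j + 1) (acc.1 ++ [(j : Int) + 1], acc.2) hdrop (by omega)
        push_cast at this ⊢
        exact this

theorem pvSegRev (s L : Int) :
    PySem.List.pyRange (s + L) (s - 1) (-1) = (PySem.List.pyRange s (s + L + 1) 1).reverse := by
  rw [PySem.List.pyRange_neg_one_eq_reverse, show s - 1 + 1 = s by ring]

theorem pvConsRange (stack : List Int) (k M : Int) (h : k + 1 < M) :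
    stack ++ [k + 1] ++ PySem.List.pyRange (k + 1 + 1) M 1
      = stack ++ PySem.List.pyRange (k + 1) M 1 := by
  rw [List.append_assoc]
  congr 1
  rw [PySem.List.pyRange_one_cons h]
  simp

theorem pvAGo_eq (cs : List Char) :
    ∀ (k : Int) (stack res : List Int),
      pvAGo cs k (stack, res)
        = ([], res
            ++ (stack ++ PySem.List.pyRange (k + 1) (k + ((pvSplitIp cs).1.length : Int) + 2) 1).reverse
            ++ pvBLoop (pvSplitIp cs).2 [] (k + ((pvSplitIp cs).1.length : Int) + 2)) := by
  induction cs with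
  | nil =>
      intro k stack res
      have hr : PySem.List.pyRange (k + 1) (k + 2) 1 = [k + 1] := by
        rw [show (k : Int) + 2 = (k + 1) + 1 by ring, PySem.List.pyRange_one_singleton]
      rw [pvAGo, pvFlushA_eq]
      simp [pvSplitIp, pvBLoop, hr]
  | cons c rest ih =>
      intro k stack res
      by_cases hc : c = 'I'
      · subst hc
        rw [pvAGo, if_pos rfl, pvFlushA_eq,
            ih (k + 1) [] (res ++ (stack ++ [k + 1]).reverse)]
        have hsp : pvSplitIp ('I' :: rest) = ([], (pvSplitIp rest).1 :: (pvSplitIp rest).2) := by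
          simp [pvSplitIp]
        rw [hsp]
        simp only [List.length_nil, Nat.cast_zero, add_zero, List.nil_append]
        rw [pvBLoop]
        rw [pvBLoop_append]
        have e1 : (k : Int) + 1 + ((pvSplitIp rest).1.length : Int) + 2
            = k + 2 + ((pvSplitIp rest).1.length : Int) + 1 := by ring
        have e2 : (k : Int) + 1 + 1 = k + 2 := by ring
        rw [e1, e2]
        rw [pvSegRev (k + 2) ((pvSplitIp rest).1.length : Int)]
        have hr : PySem.List.pyRange (k + 1) (k + 2) 1 = [k + 1] := by
          rw [show (k : Int) + 2 = (k + 1) + 1 by ring, PySem.List.pyRange_one_singleton]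
        conv_rhs => rw [pvBLoop_append]
        simp [hr, List.append_assoc]
      · rw [pvAGo, if_neg hc, ih (k + 1) (stack ++ [k + 1]) res]
        have hsp : pvSplitIp (c :: rest) = (c :: (pvSplitIp rest).1, (pvSplitIp rest).2) := by
          simp [pvSplitIp, hc]
        rw [hsp]
        simp only [List.length_cons]
        push_cast
        have e1 : (k : Int) + (((pvSplitIp rest).1.length : Int) + 1) + 2
            = k + 1 + ((pvSplitIp rest).1.length : Int) + 2 := by ring
        rw [e1]
        rw [pvConsRange stack k (k + 1 + ((pvSplitIp rest).1.length : Int) + 2) (by omega)]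

theorem pvKey (cs : List Char) :
    ((PySem.List.pyRange 0 ((cs.length : Int) + 1) 1).foldl (pvStepA cs) ([], [])).2
      = pvBLoop (PySem.Chars.splitOn cs ['I']) [] 1 := by
  rw [show (0 : Int) = ((0 : Nat) : Int) by simp]
  rw [pvBridgeA cs cs 0 ([], []) (by simp) (by omega)]
  simp only [Nat.cast_zero]
  rw [pvAGo_eq cs 0 [] []]
  rw [pvSplitOn_eq cs]
  rw [pvBLoop]
  rw [pvBLoop_append]
  simp only [List.nil_append]
  rw [pvSegRev 1 ((pvSplitIp cs).1.length : Int)]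
  have e1 : (0 : Int) + ((pvSplitIp cs).1.length : Int) + 2
      = 1 + ((pvSplitIp cs).1.length : Int) + 1 := by ring
  have e2 : (0 : Int) + 1 = 1 := by ring
  rw [e1, e2]
  conv_rhs => rw [pvBLoop_append]

-- ===== VERDICT (by name: the statement is the Claim_ definition above) =====
theorem arrange_guest_arrival_order_spec : Claim_equal_arrange_guest_arrival_order := by
  intro s _
  unfold Spec_arrange_guest_arrival_order arrange_guest_arrival_order arrange_guest_arrival_order_alt
  show PySem.Str.join ""
      (((((PySem.List.pyRange 0 ((s.toList.length : Int) + 1) 1).foldl (pvStepA s.toList) ([], [])).2)).map PySem.Int.toStr)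
    = PySem.Str.join "" ((pvBLoop (PySem.Chars.splitOn s.toList ['I']) [] 1).map PySem.Int.toStr)
  rw [pvKey s.toList]
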